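-- pv_equiv track=rewrite | github.com/Tanych/launchpad | lp/ui/subjects.py | fix_ampersands
-- ===== SOURCE A (Python) =====
-- def fix_ampersands(qs):
--     """
--     Try to fix openurl that don't encode ampersands correctly. This is kind of
--     tricky business. The basic idea is to split the query string on '=' and
--     then inpsect each part to make sure there aren't more than one '&'
--     characters in it. If there are, all but the last are assumed to need
--     encoding. Similarly, if an ampersand is present in the last part, it
--     is assumed to need encoding since there is no '=' following it.
--
--     TODO: if possible we should really try to fix wherever these OpenURLs are
--     getting created upstream instead of hacking around it here.
--     """
--     parts = []
--     for p in qs.split('='):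
--         if p.count('&') > 1:
--             l = p.split('&')
--             last = l.pop()
--             p = '%26'.join(l) + '&' + last
--         parts.append(p)
--
--     # an & in the last part definitely needs encoding
--     parts[-1] = parts[-1].replace('&', '%26')
--
--     return '='.join(parts)
-- ===== SOURCE B (Python) =====
-- def fix_ampersands(qs):
--     """Single right-to-left scan: in the last '='-segment every '&' is encoded;
--     in any other segment the rightmost '&' is kept and the rest are encoded."""
--     out = []
--     is_last = True   # still inside the last '='-segment (no '=' seen yet)
--     kept = False     # an '&' has already been preserved in the current segment
--     for c in reversed(qs):
--         if c == '&':
--             if is_last or kept: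
--                 out.append('62%')  # '%26' reversed
--             else:
--                 out.append('&')
--                 kept = True
--         elif c == '=':
--             is_last = False
--             kept = False
--             out.append('=')
--         else:
--             out.append(c)
--     return ''.join(out)[::-1]
-- ===== Notes on version B (the rewrite author's own statement) =====
-- stated objective: alternative
-- what changed: Replaces the split('=')/count/split('&')/pop/join/replace pipeline with a single right-to-left character scan holding two boolean flags (inside-last-segment, ampersand-already-kept) that streams the encoded output in reverse.
import Mathlib
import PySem

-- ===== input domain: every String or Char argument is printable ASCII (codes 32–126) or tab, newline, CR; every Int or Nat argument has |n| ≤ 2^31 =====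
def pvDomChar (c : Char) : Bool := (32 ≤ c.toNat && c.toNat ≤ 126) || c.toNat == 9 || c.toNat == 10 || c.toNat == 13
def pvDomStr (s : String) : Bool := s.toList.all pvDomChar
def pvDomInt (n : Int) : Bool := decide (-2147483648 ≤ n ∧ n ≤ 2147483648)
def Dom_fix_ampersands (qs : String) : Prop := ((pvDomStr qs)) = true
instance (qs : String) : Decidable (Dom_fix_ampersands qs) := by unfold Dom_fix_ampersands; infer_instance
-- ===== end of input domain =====

-- B replaces A's split('=')/count/split('&')/pop/join/replace pipeline by one right-to-left
-- streaming scan with two boolean flags (alternative decomposition, same asymptotic cost).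

-- ===== PORT A =====
-- qs.split('='): each part is encoded (all but its last '&') and the last part fully encoded.
def fix_ampersands (qs : String) : String :=
  let parts := (PySem.Chars.splitOn qs.toList ['=']).map (fun p =>
    if PySem.Chars.count p ['&'] > 1 then
      let l := PySem.Chars.splitOn p ['&']
      PySem.Chars.join ['%', '2', '6'] l.dropLast ++ '&' :: l.getLastD []
    else p)
  String.mk (PySem.Chars.join ['=']
    (parts.dropLast ++ [PySem.Chars.replace (parts.getLastD []) ['&'] ['%', '2', '6']]))

-- ===== PORT B =====
-- one step of B's right-to-left scan: state = (is_last, kept, out)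
def fixAmpStep (st : Bool × Bool × List Char) (c : Char) : Bool × Bool × List Char :=
  if c = '&' then
    if st.1 || st.2.1 then (st.1, st.2.1, st.2.2 ++ ['6', '2', '%'])
    else (st.1, true, st.2.2 ++ ['&'])
  else if c = '=' then (false, false, st.2.2 ++ ['='])
  else (st.1, st.2.1, st.2.2 ++ [c])

def fix_ampersands_alt (qs : String) : String :=
  String.mk ((qs.toList.reverse.foldl fixAmpStep (true, false, [])).2.2.reverse)

-- ===== PRECONDITION & SPEC =====
def Spec_fix_ampersands (qs : String) (out : String) : Prop := out = fix_ampersands_alt qs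
instance (qs : String) (out : String) : Decidable (Spec_fix_ampersands qs out) := by unfold Spec_fix_ampersands; infer_instance

-- ===== CLAIM (what is proved, stated in full; the proofs are below) =====
def Claim_equal_fix_ampersands : Prop := ∀ (qs : String), Dom_fix_ampersands qs → Spec_fix_ampersands qs (fix_ampersands qs)

-- ===== LEMMAS AND PROOFS =====

def msplit (s : Char) : List Char → List (List Char)
  | [] => [[]]
  | c :: l =>
    if c = s then [] :: msplit s l
    else
      match msplit s l with
      | [] => [[c]]
      | x :: xs => (c :: x) :: xs
def consHd (p : List Char) : List (List Char) → List (List Char)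
  | [] => [p]
  | x :: xs => (p ++ x) :: xs
theorem msplit_ne_nil (s : Char) (l : List Char) : msplit s l ≠ [] := by
  induction l with
  | nil => simp [msplit]
  | cons c l ih =>
    simp only [msplit]
    split
    · simp
    · cases h : msplit s l with
      | nil => simp
      | cons x xs => simp
theorem consHd_nil_of_ne (m : List (List Char)) (h : m ≠ []) : consHd [] m = m := by
  cases m with
  | nil => exact absurd rfl h
  | cons x xs => simp [consHd]
theorem splitOn_go_single (s : Char) :
    ∀ (l : List Char) (fuel : Nat) (cur : List Char) (acc : List (List Char)),
      l.length ≤ fuel →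
      PySem.Chars.splitOn.go [s] fuel l cur acc = acc.reverse ++ consHd cur.reverse (msplit s l) := by
  intro l
  induction l with
  | nil =>
    intro fuel cur acc h
    cases fuel <;> simp [PySem.Chars.splitOn.go, msplit, consHd]
  | cons c rest ih =>
    intro fuel cur acc h
    cases fuel with
    | zero => simp at h
    | succ n =>
      simp only [List.length_cons, Nat.succ_le_succ_iff] at h
      by_cases hc : c = s
      · have hpre : List.isPrefixOf [s] (c :: rest) = true := by
          simp [List.isPrefixOf, hc, beq_iff_eq]
        rw [PySem.Chars.splitOn.go]
        simp only [hpre, if_true, List.length_cons, List.length_nil, List.drop_succ_cons, List.drop_zero]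
        rw [ih n [] (cur.reverse :: acc) h]
        rw [show ([] : List Char).reverse = [] from rfl, consHd_nil_of_ne _ (msplit_ne_nil s rest)]
        simp [msplit, hc, consHd]
      · have hpre : List.isPrefixOf [s] (c :: rest) = false := by
          simp [List.isPrefixOf]; exact fun h => absurd h.symm hc
        rw [PySem.Chars.splitOn.go]
        simp only [hpre, Bool.false_eq_true, if_false]
        rw [ih n (c :: cur) acc h]
        simp only [msplit, if_neg hc]
        cases hm : msplit s rest with
        | nil => exact absurd hm (msplit_ne_nil s rest)
        | cons x xs => simp [consHd]
theorem splitOn_single (s : Char) (l : List Char) :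
    PySem.Chars.splitOn l [s] = msplit s l := by
  unfold PySem.Chars.splitOn
  rw [splitOn_go_single s l (l.length + 1) [] [] (by omega)]
  rw [show ([] : List Char).reverse = [] from rfl, consHd_nil_of_ne _ (msplit_ne_nil s l)]
  rfl
theorem count_go_single (s : Char) :
    ∀ (l : List Char) (fuel : Nat) (acc : Nat), l.length ≤ fuel →
      PySem.Chars.count.go [s] fuel l acc = acc + l.count s := by
  intro l
  induction l with
  | nil => intro fuel acc h; cases fuel <;> simp [PySem.Chars.count.go]
  | cons c rest ih =>
    intro fuel acc h
    cases fuel with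
    | zero => simp at h
    | succ n =>
      simp only [List.length_cons, Nat.succ_le_succ_iff] at h
      by_cases hc : c = s
      · have hpre : List.isPrefixOf [s] (c :: rest) = true := by simp [List.isPrefixOf, hc]
        rw [PySem.Chars.count.go]
        simp only [hpre, if_true, List.length_cons, List.length_nil, List.drop_succ_cons, List.drop_zero]
        rw [ih n (acc + 1) h, hc]
        simp [List.count_cons]
        omega
      · have hpre : List.isPrefixOf [s] (c :: rest) = false := by
          simp [List.isPrefixOf]; exact fun h => absurd h.symm hc
        rw [PySem.Chars.count.go]
        simp only [hpre, Bool.false_eq_true, if_false]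
        rw [ih n acc h]
        simp [List.count_cons, hc]
theorem count_single (s : Char) (l : List Char) :
    PySem.Chars.count l [s] = l.count s := by
  unfold PySem.Chars.count
  simp only [List.isEmpty_cons, Bool.false_eq_true, if_false]
  rw [count_go_single s l l.length 0 (le_refl _)]
  omega
theorem replace_go_single (s : Char) (new : List Char) :
    ∀ (l : List Char) (fuel : Nat) (acc : List Char), l.length ≤ fuel →
      PySem.Chars.replace.go [s] new fuel l acc =
        acc.reverse ++ l.flatMap (fun c => if c = s then new else [c]) := by
  intro l
  induction l with
  | nil => intro fuel acc h; cases fuel <;> simp [PySem.Chars.replace.go]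
  | cons c rest ih =>
    intro fuel acc h
    cases fuel with
    | zero => simp at h
    | succ n =>
      simp only [List.length_cons, Nat.succ_le_succ_iff] at h
      by_cases hc : c = s
      · have hpre : List.isPrefixOf [s] (c :: rest) = true := by simp [List.isPrefixOf, hc]
        rw [PySem.Chars.replace.go]
        simp only [hpre, if_true, List.length_cons, List.length_nil, List.drop_succ_cons, List.drop_zero]
        rw [ih n (new.reverse ++ acc) h]
        simp [hc]
      · have hpre : List.isPrefixOf [s] (c :: rest) = false := by
          simp [List.isPrefixOf]; exact fun h => absurd h.symm hc
        rw [PySem.Chars.replace.go]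
        simp only [hpre, Bool.false_eq_true, if_false]
        rw [ih n (c :: acc) h]
        simp [hc]
theorem replace_single (s : Char) (new : List Char) (l : List Char) :
    PySem.Chars.replace l [s] new = l.flatMap (fun c => if c = s then new else [c]) := by
  unfold PySem.Chars.replace
  simp only [List.isEmpty_cons, Bool.false_eq_true, if_false]
  rw [replace_go_single s new l l.length [] (le_refl _)]
  rfl
theorem not_mem_of_mem_msplit (s : Char) (l : List Char) :
    ∀ p ∈ msplit s l, s ∉ p := by
  induction l with
  | nil => intro p hp; simp [msplit] at hp; simp [hp]
  | cons c rest ih =>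
    intro p hp
    simp only [msplit] at hp
    by_cases hc : c = s
    · rw [if_pos hc] at hp
      rcases List.mem_cons.mp hp with h | h
      · simp [h]
      · exact ih p h
    · rw [if_neg hc] at hp
      cases hm : msplit s rest with
      | nil => exact absurd hm (msplit_ne_nil s rest)
      | cons x xs =>
        rw [hm] at hp
        rcases List.mem_cons.mp hp with h | h
        · subst h
          intro hmem
          rcases List.mem_cons.mp hmem with h' | h'
          · exact hc h'.symm
          · exact ih x (hm ▸ List.mem_cons_self) h'
        · exact ih p (hm ▸ List.mem_cons_of_mem x h)
theorem join_cons_head (s c : Char) (x : List Char) (xs : List (List Char)) :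
    PySem.Chars.join [s] ((c :: x) :: xs) = c :: PySem.Chars.join [s] (x :: xs) := by
  cases xs with
  | nil => simp [PySem.Chars.join_singleton]
  | cons q rest => rw [PySem.Chars.join_cons_cons, PySem.Chars.join_cons_cons]; simp
theorem join_msplit (s : Char) (l : List Char) :
    PySem.Chars.join [s] (msplit s l) = l := by
  induction l with
  | nil => simp [msplit, PySem.Chars.join_singleton]
  | cons c rest ih =>
    simp only [msplit]
    by_cases hc : c = s
    · rw [if_pos hc]
      cases hm : msplit s rest with
      | nil => exact absurd hm (msplit_ne_nil s rest)
      | cons x xs =>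
        rw [PySem.Chars.join_cons_cons]
        rw [← hm, ih, hc]
        simp
    · rw [if_neg hc]
      cases hm : msplit s rest with
      | nil => exact absurd hm (msplit_ne_nil s rest)
      | cons x xs =>
        rw [join_cons_head, ← hm, ih]
theorem length_msplit (s : Char) (l : List Char) :
    (msplit s l).length = l.count s + 1 := by
  induction l with
  | nil => simp [msplit]
  | cons c rest ih =>
    simp only [msplit]
    by_cases hc : c = s
    · rw [if_pos hc]
      simp [List.count_cons, hc, ih]
    · rw [if_neg hc]
      cases hm : msplit s rest with
      | nil => exact absurd hm (msplit_ne_nil s rest)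
      | cons x xs =>
        have := ih
        rw [hm] at this
        simp only [List.length_cons] at this ⊢
        simp [List.count_cons, hc]
        omega
theorem joinL (s : Char) (xs : List (List Char)) (y : List Char) :
    PySem.Chars.join [s] (xs ++ [y]) = xs.flatMap (fun p => p ++ [s]) ++ y := by
  induction xs with
  | nil => simp [PySem.Chars.join_singleton]
  | cons x rest ih =>
    have hne : rest ++ [y] ≠ [] := by simp
    cases hm : rest ++ [y] with
    | nil => exact absurd hm hne
    | cons q qs =>
      rw [List.cons_append, hm, PySem.Chars.join_cons_cons, ← hm, ih]
      simp
theorem joinR (s : Char) (xs : List (List Char)) (v : List Char) (hxs : xs ≠ []) :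
    PySem.Chars.join [s] (xs ++ [v]) = PySem.Chars.join [s] xs ++ s :: v := by
  induction xs with
  | nil => exact absurd rfl hxs
  | cons x rest ih =>
    cases rest with
    | nil => simp [PySem.Chars.join_singleton, PySem.Chars.join_cons_cons]
    | cons r rs =>
      have h1 : (x :: r :: rs) ++ [v] = x :: r :: (rs ++ [v]) := by simp
      rw [h1, PySem.Chars.join_cons_cons]
      have h2 : r :: (rs ++ [v]) = (r :: rs) ++ [v] := by simp
      rw [h2, ih (by simp), PySem.Chars.join_cons_cons]
      simp
def encF (c : Char) : List Char := if c = '&' then ['%', '2', '6'] else [c]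
def fwdAll (l : List Char) : List Char := l.flatMap encF
def encR (c : Char) : List Char := if c = '&' then ['6', '2', '%'] else [c]
def ecAllR (l : List Char) : List Char := l.flatMap encR
def ecFirstR : List Char → List Char
  | [] => []
  | c :: r => if c = '&' then '&' :: ecAllR r else c :: ecFirstR r
def procA (p : List Char) : List Char :=
  if p.count '&' > 1 then
    PySem.Chars.join ['%', '2', '6'] (msplit '&' p).dropLast ++ '&' :: (msplit '&' p).getLastD []
  else p

theorem fwdAll_append (a b : List Char) : fwdAll (a ++ b) = fwdAll a ++ fwdAll b := by
  simp [fwdAll]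
theorem fwdAll_no (w : List Char) (h : '&' ∉ w) : fwdAll w = w := by
  induction w with
  | nil => rfl
  | cons c r ih =>
    have hc : c ≠ '&' := fun hc => h (hc ▸ List.mem_cons_self)
    simp only [fwdAll, List.flatMap_cons] at *
    rw [ih (fun hm => h (List.mem_cons_of_mem c hm))]
    simp [encF, hc]
theorem encR_eq_rev (c : Char) : encR c = (encF c).reverse := by
  by_cases hc : c = '&' <;> simp [encR, encF, hc]
theorem ecAllR_rev (w : List Char) : ecAllR w.reverse = (fwdAll w).reverse := by
  induction w with
  | nil => rfl
  | cons c r ih =>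
    simp only [fwdAll, List.flatMap_cons, List.reverse_cons, List.reverse_append]
    rw [← fwdAll, ← ih]
    simp [ecAllR, encR_eq_rev]
theorem ecFirstR_no (v : List Char) (h : '&' ∉ v) : ecFirstR v = v := by
  induction v with
  | nil => rfl
  | cons c r ih =>
    have hc : c ≠ '&' := fun hc => h (hc ▸ List.mem_cons_self)
    simp only [ecFirstR, if_neg hc]
    rw [ih (fun hm => h (List.mem_cons_of_mem c hm))]
theorem ecFirstR_split (v u : List Char) (h : '&' ∉ v) :
    ecFirstR (v ++ '&' :: u) = v ++ '&' :: ecAllR u := by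
  induction v with
  | nil => simp [ecFirstR]
  | cons c r ih =>
    have hc : c ≠ '&' := fun hc => h (hc ▸ List.mem_cons_self)
    simp only [List.cons_append, ecFirstR, if_neg hc]
    rw [ih (fun hm => h (List.mem_cons_of_mem c hm))]
theorem fwdAll_join (ps : List (List Char)) (h : ∀ p ∈ ps, '&' ∉ p) :
    fwdAll (PySem.Chars.join ['&'] ps) = PySem.Chars.join ['%', '2', '6'] ps := by
  induction ps with
  | nil => rfl
  | cons p rest ih =>
    cases rest with
    | nil => simp [PySem.Chars.join_singleton, fwdAll_no p (h p List.mem_cons_self)]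
    | cons q qs =>
      rw [PySem.Chars.join_cons_cons, PySem.Chars.join_cons_cons, fwdAll_append, fwdAll_append]
      rw [fwdAll_no p (h p List.mem_cons_self), ih (fun r hr => h r (List.mem_cons_of_mem p hr))]
      simp [fwdAll, encF]
theorem no_amp_join (ps : List (List Char)) (h : ∀ p ∈ ps, '&' ∉ p) :
    '&' ∉ PySem.Chars.join ['%', '2', '6'] ps := by
  induction ps with
  | nil => simp [PySem.Chars.join_nil]
  | cons p rest ih =>
    cases rest with
    | nil => simpa [PySem.Chars.join_singleton] using h p List.mem_cons_self
    | cons q qs =>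
      rw [PySem.Chars.join_cons_cons]
      intro hm
      simp only [List.mem_append] at hm
      rcases hm with (hm | hm) | hm
      · exact h p List.mem_cons_self hm
      · simp at hm
      · exact ih (fun r hr => h r (List.mem_cons_of_mem p hr)) hm
theorem amp_decomp (p : List Char) (hin : '&' ∈ p) :
    ∃ xs v, msplit '&' p = xs ++ [v] ∧ xs ≠ [] ∧ (∀ q ∈ xs, '&' ∉ q) ∧ '&' ∉ v ∧
      p = PySem.Chars.join ['&'] xs ++ '&' :: v ∧ xs.length = p.count '&' := by
  have hne := msplit_ne_nil '&' p
  have hlen := length_msplit '&' p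
  have hcnt : 0 < p.count '&' := List.count_pos_iff.mpr hin
  obtain ⟨xs, v, h2⟩ : ∃ xs v, msplit '&' p = xs ++ [v] :=
    ⟨_, _, (List.dropLast_append_getLast hne).symm⟩
  have hlx : xs.length = p.count '&' := by
    rw [h2] at hlen
    simp at hlen
    omega
  have hxs : xs ≠ [] := by
    intro h
    rw [h] at hlx
    simp at hlx
    omega
  refine ⟨xs, v, h2, hxs, ?_, ?_, ?_, hlx⟩
  · intro q hq
    exact not_mem_of_mem_msplit '&' p q (h2 ▸ List.mem_append_left [v] hq)
  · exact not_mem_of_mem_msplit '&' p v (h2 ▸ List.mem_append_right xs List.mem_cons_self)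
  · rw [← join_msplit '&' p, h2, joinR '&' xs v hxs]

theorem keyLemma (p : List Char) : (ecFirstR p.reverse).reverse = procA p := by
  by_cases hin : '&' ∈ p
  · obtain ⟨xs, v, heq, hxs, hqs, hv, hp, hlen⟩ := amp_decomp p hin
    have hvr : '&' ∉ v.reverse := by simpa using hv
    have hL : p.reverse = v.reverse ++ '&' :: (PySem.Chars.join ['&'] xs).reverse := by
      rw [hp]
      simp
    rw [hL, ecFirstR_split _ _ hvr, ecAllR_rev, fwdAll_join xs hqs]
    have hL2 : (v.reverse ++ '&' :: (PySem.Chars.join ['%', '2', '6'] xs).reverse).reverse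
        = PySem.Chars.join ['%', '2', '6'] xs ++ '&' :: v := by simp
    rw [hL2]
    by_cases hgt : p.count '&' > 1
    · rw [procA, if_pos hgt, heq, List.dropLast_concat, List.getLastD_concat]
    · have h1 : p.count '&' = 1 := by
        have := List.count_pos_iff.mpr hin
        omega
      have hxs1 : xs.length = 1 := by rw [hlen, h1]
      obtain ⟨x0, hx0⟩ := List.length_eq_one_iff.mp hxs1
      rw [procA, if_neg hgt, hp, hx0]
      simp [PySem.Chars.join_singleton]
  · have h0 : p.count '&' = 0 := List.count_eq_zero.mpr hin
    rw [procA, if_neg (by omega)]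
    rw [ecFirstR_no _ (by simpa using hin), List.reverse_reverse]

theorem afix (p : List Char) : fwdAll (procA p) = fwdAll p := by
  by_cases hgt : p.count '&' > 1
  · have hin : '&' ∈ p := by
      by_contra h
      rw [List.count_eq_zero.mpr h] at hgt
      omega
    obtain ⟨xs, v, heq, hxs, hqs, hv, hp, hlen⟩ := amp_decomp p hin
    rw [procA, if_pos hgt, heq, List.dropLast_concat, List.getLastD_concat]
    rw [show ('&' :: v : List Char) = ['&'] ++ v from rfl, fwdAll_append, fwdAll_append]
    rw [fwdAll_no _ (no_amp_join xs hqs), fwdAll_no v hv]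
    conv_rhs => rw [hp]
    rw [show ('&' :: v : List Char) = ['&'] ++ v from rfl, fwdAll_append, fwdAll_append]
    rw [fwdAll_join xs hqs, fwdAll_no v hv]
  · rw [procA, if_neg hgt]
def bcat : List Char → Bool → Bool → List Char
  | [], _, _ => []
  | c :: r, isLast, kept =>
    if c = '&' then
      if isLast || kept then '6' :: '2' :: '%' :: bcat r isLast kept
      else '&' :: bcat r isLast true
    else if c = '=' then '=' :: bcat r false false
    else c :: bcat r isLast kept

theorem bcat_B1 (r : List Char) (h : '=' ∉ r) :
    ∀ (t : List Char) (k : Bool), bcat (r ++ t) true k = ecAllR r ++ bcat t true k := by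
  induction r with
  | nil => intro t k; simp [ecAllR]
  | cons c r ih =>
    intro t k
    have hc : c ≠ '=' := fun hc => h (hc ▸ List.mem_cons_self)
    have h' : '=' ∉ r := fun hm => h (List.mem_cons_of_mem c hm)
    by_cases ha : c = '&'
    · simp only [List.cons_append, bcat, ha, if_pos rfl, Bool.true_or, if_true]
      rw [ih h']
      simp [ecAllR, encR]
    · simp only [List.cons_append, bcat, if_neg ha, if_neg hc]
      rw [ih h']
      simp [ecAllR, encR, ha]

theorem bcat_B2a (r : List Char) (h : '=' ∉ r) :
    ∀ (t : List Char), bcat (r ++ t) false true = ecAllR r ++ bcat t false true := by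
  induction r with
  | nil => intro t; simp [ecAllR]
  | cons c r ih =>
    intro t
    have hc : c ≠ '=' := fun hc => h (hc ▸ List.mem_cons_self)
    have h' : '=' ∉ r := fun hm => h (List.mem_cons_of_mem c hm)
    by_cases ha : c = '&'
    · simp only [List.cons_append, bcat, ha, if_pos rfl, Bool.false_or, if_true]
      rw [ih h']
      simp [ecAllR, encR]
    · simp only [List.cons_append, bcat, if_neg ha, if_neg hc]
      rw [ih h']
      simp [ecAllR, encR, ha]

theorem bcat_B2none (r : List Char) (h : '=' ∉ r) :
    bcat r false false = ecFirstR r := by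
  induction r with
  | nil => rfl
  | cons c r ih =>
    have hc : c ≠ '=' := fun hc => h (hc ▸ List.mem_cons_self)
    have h' : '=' ∉ r := fun hm => h (List.mem_cons_of_mem c hm)
    by_cases ha : c = '&'
    · simp only [bcat, ha, if_pos rfl, Bool.false_or, Bool.or_false, if_false, ecFirstR]
      have h2 := bcat_B2a r h' []
      simp only [List.append_nil] at h2
      rw [h2]
      simp [bcat]
    · simp only [bcat, if_neg ha, if_neg hc, ecFirstR]
      rw [ih h']

theorem bcat_B2eq (r : List Char) (h : '=' ∉ r) :
    ∀ (t : List Char), bcat (r ++ '=' :: t) false false = ecFirstR r ++ '=' :: bcat t false false := by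
  induction r with
  | nil => intro t; simp [bcat, ecFirstR]
  | cons c r ih =>
    intro t
    have hc : c ≠ '=' := fun hc => h (hc ▸ List.mem_cons_self)
    have h' : '=' ∉ r := fun hm => h (List.mem_cons_of_mem c hm)
    by_cases ha : c = '&'
    · simp only [List.cons_append, bcat, ha, if_pos rfl, Bool.false_or, Bool.or_false, if_false, ecFirstR]
      rw [bcat_B2a r h' ('=' :: t)]
      rw [show bcat ('=' :: t) false true = '=' :: bcat t false false by simp [bcat]]
      simp
    · simp only [List.cons_append, bcat, if_neg ha, if_neg hc, ecFirstR]
      rw [ih h']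

theorem bcat_aux (rs : List (List Char)) (h : ∀ r ∈ rs, '=' ∉ r) :
    ∀ (b k : Bool),
      bcat (rs.flatMap (fun r => '=' :: r)) b k = rs.flatMap (fun r => '=' :: ecFirstR r) := by
  induction rs with
  | nil => intro b k; simp [bcat]
  | cons r rs ih =>
    intro b k
    have hr : '=' ∉ r := h r List.mem_cons_self
    have h' : ∀ q ∈ rs, '=' ∉ q := fun q hq => h q (List.mem_cons_of_mem r hq)
    simp only [List.flatMap_cons, List.cons_append]
    have hstep : bcat ('=' :: (r ++ rs.flatMap (fun r => '=' :: r))) b k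
        = '=' :: bcat (r ++ rs.flatMap (fun r => '=' :: r)) false false := by
      simp [bcat]
    rw [hstep]
    cases rs with
    | nil =>
      simp only [List.flatMap_nil, List.append_nil]
      rw [bcat_B2none r hr]
    | cons r2 rs2 =>
      simp only [List.flatMap_cons, List.cons_append]
      rw [bcat_B2eq r hr]
      have hih := ih h' false false
      simp only [List.flatMap_cons, List.cons_append] at hih
      have hih2 : bcat ('=' :: (r2 ++ rs2.flatMap (fun r => '=' :: r))) false false
          = '=' :: bcat (r2 ++ rs2.flatMap (fun r => '=' :: r)) false false := by
        simp [bcat]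
      rw [hih2] at hih
      rw [List.cons.injEq] at hih
      rw [hih.2]

theorem bcat_main (r0 : List Char) (rs : List (List Char)) (h0 : '=' ∉ r0)
    (h : ∀ r ∈ rs, '=' ∉ r) :
    bcat (r0 ++ rs.flatMap (fun r => '=' :: r)) true false =
      ecAllR r0 ++ rs.flatMap (fun r => '=' :: ecFirstR r) := by
  rw [bcat_B1 r0 h0, bcat_aux rs h]

theorem foldl_bcat (r : List Char) :
    ∀ (b k : Bool) (acc : List Char),
      ∃ b1 b2, r.foldl fixAmpStep (b, k, acc) = (b1, b2, acc ++ bcat r b k) := by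
  induction r with
  | nil => intro b k acc; exact ⟨b, k, by simp [bcat]⟩
  | cons c r ih =>
    intro b k acc
    simp only [List.foldl_cons]
    by_cases ha : c = '&'
    · cases hbk : b || k
      · obtain ⟨b1, b2, hh⟩ := ih b true (acc ++ ['&'])
        refine ⟨b1, b2, ?_⟩
        rw [show fixAmpStep (b, k, acc) c = (b, true, acc ++ ['&']) by simp [fixAmpStep, ha, hbk]]
        rw [hh]
        have hb : b = false := by cases b <;> simp_all
        have hk : k = false := by cases k <;> simp_all
        simp [bcat, ha, hb, hk]
      · obtain ⟨b1, b2, hh⟩ := ih b k (acc ++ ['6', '2', '%'])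
        refine ⟨b1, b2, ?_⟩
        rw [show fixAmpStep (b, k, acc) c = (b, k, acc ++ ['6', '2', '%']) by simp [fixAmpStep, ha, hbk]]
        rw [hh]
        simp [bcat, ha, hbk]
    · by_cases he : c = '='
      · obtain ⟨b1, b2, hh⟩ := ih false false (acc ++ ['='])
        refine ⟨b1, b2, ?_⟩
        rw [show fixAmpStep (b, k, acc) c = (false, false, acc ++ ['=']) by simp [fixAmpStep, ha, he]]
        rw [hh]
        simp [bcat, ha, he]
      · obtain ⟨b1, b2, hh⟩ := ih b k (acc ++ [c])
        refine ⟨b1, b2, ?_⟩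
        rw [show fixAmpStep (b, k, acc) c = (b, k, acc ++ [c]) by simp [fixAmpStep, ha, he]]
        rw [hh]
        simp [bcat, ha, he]
theorem fwdAll_eq_flatMap (l : List Char) :
    l.flatMap (fun c => if c = '&' then ['%', '2', '6'] else [c]) = fwdAll l := rfl

theorem B_norm (qs : String) :
    fix_ampersands_alt qs = String.mk ((bcat qs.toList.reverse true false).reverse) := by
  unfold fix_ampersands_alt
  obtain ⟨b1, b2, h⟩ := foldl_bcat qs.toList.reverse true false []
  rw [h]
  simp

theorem A_norm (qs : String) :
    fix_ampersands qs =
      String.mk (PySem.Chars.join ['=']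
        (((msplit '=' qs.toList).dropLast).map procA ++
          [fwdAll ((msplit '=' qs.toList).getLastD [])])) := by
  unfold fix_ampersands
  rw [splitOn_single]
  have hmap : (msplit '=' qs.toList).map (fun p =>
      if PySem.Chars.count p ['&'] > 1 then
        PySem.Chars.join ['%', '2', '6'] (PySem.Chars.splitOn p ['&']).dropLast ++
          '&' :: (PySem.Chars.splitOn p ['&']).getLastD []
      else p) = (msplit '=' qs.toList).map procA := by
    apply List.map_congr_left
    intro p _
    rw [count_single, splitOn_single, procA]
  rw [hmap]
  obtain ⟨sss, y, heq⟩ : ∃ sss y, msplit '=' qs.toList = sss ++ [y] :=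
    ⟨_, _, (List.dropLast_append_getLast (msplit_ne_nil '=' qs.toList)).symm⟩
  rw [heq]
  show String.mk (PySem.Chars.join ['=']
      ((List.map procA (sss ++ [y])).dropLast ++
        [PySem.Chars.replace ((List.map procA (sss ++ [y])).getLastD []) ['&'] ['%', '2', '6']])) = _
  rw [List.map_append, List.map_cons, List.map_nil, List.dropLast_concat, List.getLastD_concat,
    List.dropLast_concat, List.getLastD_concat]
  rw [replace_single, fwdAll_eq_flatMap, afix]

theorem main_list (l : List Char) :
    (bcat l.reverse true false).reverse =
      PySem.Chars.join ['=']
        (((msplit '=' l).dropLast).map procA ++ [fwdAll ((msplit '=' l).getLastD [])]) := by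
  have hne := msplit_ne_nil '=' l
  obtain ⟨sss, y, heq⟩ : ∃ sss y, msplit '=' l = sss ++ [y] :=
    ⟨_, _, (List.dropLast_append_getLast hne).symm⟩
  have hy : '=' ∉ y :=
    not_mem_of_mem_msplit '=' l y (heq ▸ List.mem_append_right sss List.mem_cons_self)
  have hsss : ∀ p ∈ sss, '=' ∉ p := fun p hp =>
    not_mem_of_mem_msplit '=' l p (heq ▸ List.mem_append_left [y] hp)
  have hl : l = sss.flatMap (fun p => p ++ ['=']) ++ y := by
    rw [← join_msplit '=' l, heq, joinL]
  have hrev1 : ∀ ps : List (List Char), (List.flatMap (fun p => p ++ ['=']) ps).reverse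
      = List.flatMap (fun r => '=' :: r) (ps.reverse.map List.reverse) := by
    intro ps
    rw [List.reverse_flatMap, List.flatMap_map]
    congr 1
    funext p
    simp
  have hlrev : l.reverse = y.reverse ++ (sss.reverse.map List.reverse).flatMap (fun r => '=' :: r) := by
    rw [hl, List.reverse_append, hrev1]
  rw [hlrev, bcat_main _ _ (by simpa using hy)
    (by
      intro r hr
      obtain ⟨p, hp, rfl⟩ := List.mem_map.mp hr
      simpa using hsss p (List.mem_reverse.mp hp))]
  rw [heq, List.dropLast_concat, List.getLastD_concat, joinL]
  rw [List.reverse_append, ecAllR_rev, List.reverse_reverse]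
  congr 1
  rw [List.flatMap_map, List.reverse_flatMap, List.reverse_reverse, List.flatMap_map]
  simp only [Function.comp_def]
  congr 1
  funext p
  simp [keyLemma]

-- ===== VERDICT (by name: the statement is the Claim_ definition above) =====
theorem fix_ampersands_spec : Claim_equal_fix_ampersands := by
  intro qs _
  unfold Spec_fix_ampersands
  rw [A_norm, B_norm, main_list]
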